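-- pv_equiv track=rewrite | github.com/jeet1912/leetcode | hashing/counting.py | playersWithZeroOrOneLoss
-- ===== SOURCE A (Python) =====
-- from collections import defaultdict, Counter
--
-- def playersWithZeroOrOneLoss(nums: list[list[int]]) -> list[int]:
--     lost = defaultdict(int)
--     won = defaultdict(int)
--     for match in nums:
--         winner, loser = match[0], match[1]
--         if winner not in lost.keys():
--             won[winner] +=1
--         if loser in won.keys():
--             del won[loser]
--         lost[loser] +=1
--     requiredLosers = []
--     for key, value in lost.items():
--         if value <= 1:
--             requiredLosers.append(key)
--     winners = sorted(won.keys())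
--     requiredLosers = sorted(requiredLosers)
--     return [winners,requiredLosers]
-- ===== SOURCE B (Python) =====
-- def playersWithZeroOrOneLoss(nums: list[list[int]]) -> list[int]:
--     losses = {}
--     for match in nums:
--         winner, loser = match[0], match[1]
--         losses.setdefault(winner, 0)
--         losses[loser] = losses.get(loser, 0) + 1
--     winners = sorted(p for p, c in losses.items() if c == 0)
--     oneLoss = sorted(p for p, c in losses.items() if c == 1)
--     return [winners, oneLoss]
-- ===== Notes on version B (the rewrite author's own statement) =====
-- stated objective: simpler
-- what changed: Replaces A's two-dict won/lost bookkeeping (conditional insertion into won and conditional deletion from it on every match) with a single loss-counter dict built in one pass and filtered for count 0 and count 1 at the end.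
import Mathlib
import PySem

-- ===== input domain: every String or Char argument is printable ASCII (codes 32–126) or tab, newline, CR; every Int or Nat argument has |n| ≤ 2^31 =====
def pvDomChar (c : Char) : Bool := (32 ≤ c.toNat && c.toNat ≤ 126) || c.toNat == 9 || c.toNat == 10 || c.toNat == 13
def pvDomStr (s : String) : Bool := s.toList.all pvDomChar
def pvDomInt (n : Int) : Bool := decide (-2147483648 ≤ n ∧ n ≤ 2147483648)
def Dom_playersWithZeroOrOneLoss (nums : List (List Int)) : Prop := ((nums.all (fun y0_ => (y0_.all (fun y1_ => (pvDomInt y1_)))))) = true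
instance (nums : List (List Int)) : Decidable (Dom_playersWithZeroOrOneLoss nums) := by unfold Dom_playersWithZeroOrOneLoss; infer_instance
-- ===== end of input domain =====

-- B replaces A's two-dict won/lost bookkeeping (with conditional deletions) by a single
-- loss-counter dict filtered at the end; objective: simpler. Same return value on Pre_.

-- ===== PORT A =====
-- loop body of A's `for match in nums` (state = (lost, won))
def pvStepA (st : PySem.Dict Int Int × PySem.Dict Int Int) (m : List Int) :
    PySem.Dict Int Int × PySem.Dict Int Int :=
  let lost := st.1
  let won := st.2
  let winner := PySem.List.pyGetD m 0 0   -- match[0]; Pre_ guarantees 2 ≤ len(match)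
  let loser := PySem.List.pyGetD m 1 0    -- match[1]
  let won := if lost.contains winner then won else won.modify winner 0 (· + 1)
  let won := if won.contains loser then won.erase loser else won
  (lost.modify loser 0 (· + 1), won)

def playersWithZeroOrOneLoss (nums : List (List Int)) : List (List Int) :=
  let st := nums.foldl pvStepA (PySem.Dict.empty, PySem.Dict.empty)
  let requiredLosers :=
    st.1.items.foldl (fun acc kv => if kv.2 ≤ 1 then acc ++ [kv.1] else acc) []
  [PySem.List.sorted st.2.keys (fun x => x), PySem.List.sorted requiredLosers (fun x => x)]

-- ===== PORT B =====
-- loop body of B's `for match in nums` (state = losses)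
def pvStepB (losses : PySem.Dict Int Int) (m : List Int) : PySem.Dict Int Int :=
  let winner := PySem.List.pyGetD m 0 0   -- match[0]
  let loser := PySem.List.pyGetD m 1 0    -- match[1]
  let losses := losses.setdefault winner 0
  losses.insert loser (losses.getD loser 0 + 1)

def playersWithZeroOrOneLoss_alt (nums : List (List Int)) : List (List Int) :=
  let losses := nums.foldl pvStepB PySem.Dict.empty
  [PySem.List.sorted ((losses.items.filter (fun kv => kv.2 == 0)).map (fun kv => kv.1)) (fun x => x),
   PySem.List.sorted ((losses.items.filter (fun kv => kv.2 == 1)).map (fun kv => kv.1)) (fun x => x)]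

-- ===== PRECONDITION & SPEC =====
-- Pre_ excludes rows shorter than 2, on which Python A raises IndexError at match[0]/match[1] (B raises there too).
def Pre_playersWithZeroOrOneLoss (nums : List (List Int)) : Prop := ∀ m ∈ nums, 2 ≤ m.length
instance (nums : List (List Int)) : Decidable (Pre_playersWithZeroOrOneLoss nums) := by
  unfold Pre_playersWithZeroOrOneLoss; infer_instance
def pvWitness_playersWithZeroOrOneLoss : List (List Int) := [[1, 2], [3, 1]]

def Spec_playersWithZeroOrOneLoss (nums : List (List Int)) (out : List (List Int)) : Prop :=
  out = playersWithZeroOrOneLoss_alt nums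
instance (nums : List (List Int)) (out : List (List Int)) :
    Decidable (Spec_playersWithZeroOrOneLoss nums out) := by
  unfold Spec_playersWithZeroOrOneLoss; infer_instance

-- ===== CLAIM (what is proved, stated in full; the proofs are below) =====
def Claim_equal_playersWithZeroOrOneLoss : Prop :=
  ∀ (nums : List (List Int)), Dom_playersWithZeroOrOneLoss nums →
    Pre_playersWithZeroOrOneLoss nums →
    Spec_playersWithZeroOrOneLoss nums (playersWithZeroOrOneLoss nums)

-- ===== LEMMAS AND PROOFS =====

-- Invariant relating A's state (lost, won) to B's state losses after the same prefix of matches: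
-- won holds exactly the keys of losses with count 0, lost exactly those with a positive count,
-- with matching counts, and all counts are nonnegative.
def pvInv (lost won losses : PySem.Dict Int Int) : Prop :=
  lost.keys.Nodup ∧ won.keys.Nodup ∧ losses.keys.Nodup ∧
  (∀ k, won.contains k = true ↔ (losses.contains k = true ∧ losses.getD k 0 = 0)) ∧
  (∀ k, lost.contains k = true ↔ (losses.contains k = true ∧ 0 < losses.getD k 0)) ∧
  (∀ k, lost.contains k = true → lost.getD k 0 = losses.getD k 0) ∧
  (∀ k, 0 ≤ losses.getD k 0)

lemma pv_contains_erase (d : PySem.Dict Int Int) (z k : Int) :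
    (d.erase z).contains k = true ↔ (k ≠ z ∧ d.contains k = true) := by
  by_cases h : k = z
  · subst h
    simp [PySem.Dict.erase, PySem.Dict.contains, List.any_eq_true]
  · simp only [PySem.Dict.erase, PySem.Dict.contains, List.any_eq_true, List.mem_filter]
    constructor
    · rintro ⟨p, ⟨hp, hz⟩, hk⟩; exact ⟨h, ⟨p, hp, hk⟩⟩
    · rintro ⟨-, p, hp, hk⟩
      refine ⟨p, ⟨hp, ?_⟩, hk⟩
      simp at hk
      simp [hk, h]

lemma pv_nodup_keys_erase (d : PySem.Dict Int Int) (z : Int) (h : d.keys.Nodup) :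
    (d.erase z).keys.Nodup := by
  have hsub : (d.erase z).keys.Sublist d.keys := by
    simpa [PySem.Dict.erase, PySem.Dict.keys] using
      (List.filter_sublist (l := d.items)).map (fun x => x.1)
  exact h.sublist hsub

lemma pv_mem_filter_map (d : PySem.Dict Int Int) (hnd : d.keys.Nodup) (p : Int → Bool) (k : Int) :
    k ∈ ((d.items.filter (fun kv => p kv.2)).map (fun kv => kv.1)) ↔
      (d.contains k = true ∧ p (d.getD k 0) = true) := by
  simp only [List.mem_map, List.mem_filter]
  constructor
  · rintro ⟨kv, ⟨hmem, hp⟩, hk⟩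
    obtain ⟨k', v⟩ := kv
    subst hk
    have hget : d.get? k' = some v := (PySem.Dict.get?_eq_some_iff_mem_items d k' v hnd).2 hmem
    have hc : d.contains k' = true := by
      rw [PySem.Dict.contains_eq_isSome_get?, hget]; rfl
    have hgd : d.getD k' 0 = v := PySem.Dict.getD_of_get?_eq_some d 0 hget
    exact ⟨hc, by rw [hgd]; exact hp⟩
  · rintro ⟨hc, hp⟩
    have hs : (d.get? k).isSome := by rw [← PySem.Dict.contains_eq_isSome_get?]; exact hc
    obtain ⟨v, hget⟩ := Option.isSome_iff_exists.1 hs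
    have hgd : d.getD k 0 = v := PySem.Dict.getD_of_get?_eq_some d 0 hget
    exact ⟨(k, v), ⟨(PySem.Dict.get?_eq_some_iff_mem_items d k v hnd).1 hget,
      by rw [← hgd]; exact hp⟩, rfl⟩

lemma pv_nodup_filter_map (d : PySem.Dict Int Int) (hnd : d.keys.Nodup) (p : Int → Bool) :
    ((d.items.filter (fun kv => p kv.2)).map (fun kv => kv.1)).Nodup := by
  have hsub : ((d.items.filter (fun kv => p kv.2)).map (fun kv => kv.1)).Sublist d.keys := by
    simpa [PySem.Dict.keys] using (List.filter_sublist (l := d.items)).map (fun x => x.1)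
  exact hnd.sublist hsub

lemma pv_foldl_app (l : List (Int × Int)) (acc : List Int) :
    l.foldl (fun acc kv => if kv.2 ≤ 1 then acc ++ [kv.1] else acc) acc =
      acc ++ (l.filter (fun kv => decide (kv.2 ≤ 1))).map (fun kv => kv.1) := by
  induction l generalizing acc with
  | nil => simp
  | cons kv t ih => by_cases h : kv.2 ≤ 1 <;> simp [h, ih]

lemma pvInv_step (lost won losses : PySem.Dict Int Int) (m : List Int)
    (h : pvInv lost won losses) :
    pvInv (pvStepA (lost, won) m).1 (pvStepA (lost, won) m).2 (pvStepB losses m) := by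
  obtain ⟨ndl, ndw, ndlo, h4, h5, h6, h7⟩ := h
  set w := PySem.List.pyGetD m 0 0 with hw
  set z := PySem.List.pyGetD m 1 0 with hz
  -- the B-side intermediate dict
  set d1 := losses.setdefault w 0 with hd1
  have nd1 : d1.keys.Nodup := by
    rw [hd1, PySem.Dict.setdefault]
    split
    · exact ndlo
    · next hc =>
      have hcf : losses.contains w = false := by simpa using hc
      have he : ({ items := losses.items ++ [(w, 0)] } : PySem.Dict Int Int) = losses.insert w 0 := by
        rw [PySem.Dict.insert, if_neg (by simp [hcf])]
      rw [he]; exact PySem.Dict.nodup_keys_insert losses w 0 ndlo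
  have c1 : ∀ k, d1.contains k = true ↔ (k = w ∨ losses.contains k = true) := by
    intro k
    rw [hd1, PySem.Dict.setdefault]
    split
    · next hc => constructor
                 · exact fun hk => Or.inr hk
                 · rintro (rfl | hk); exact hc; exact hk
    · next hc =>
      have hcf : losses.contains w = false := by simpa using hc
      have he : ({ items := losses.items ++ [(w, 0)] } : PySem.Dict Int Int) = losses.insert w 0 := by
        rw [PySem.Dict.insert, if_neg (by simp [hcf])]
      rw [he, PySem.Dict.contains_insert]
      simp
  have g1 : ∀ k, d1.getD k 0 = losses.getD k 0 := by
    intro k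
    rw [hd1, PySem.Dict.setdefault]
    split
    · rfl
    · next hc =>
      have hcf : losses.contains w = false := by simpa using hc
      have he : ({ items := losses.items ++ [(w, 0)] } : PySem.Dict Int Int) = losses.insert w 0 := by
        rw [PySem.Dict.insert, if_neg (by simp [hcf])]
      rw [he, PySem.Dict.getD_insert]
      split
      · next hk => subst hk; exact (PySem.Dict.getD_of_not_contains losses 0 hcf).symm
      · rfl
  -- the B-side result
  set losses' := d1.insert z (d1.getD z 0 + 1) with hlo'
  have nd2 : losses'.keys.Nodup := PySem.Dict.nodup_keys_insert d1 z _ nd1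
  have c2 : ∀ k, losses'.contains k = true ↔ (k = z ∨ k = w ∨ losses.contains k = true) := by
    intro k
    rw [hlo', PySem.Dict.contains_insert]
    simp [c1 k]
  have g2 : ∀ k, losses'.getD k 0 = if k = z then losses.getD z 0 + 1 else losses.getD k 0 := by
    intro k
    rw [hlo', PySem.Dict.getD_insert]
    split <;> simp [g1]
  -- the A-side intermediate won
  set won1 := if lost.contains w then won else won.modify w 0 (· + 1) with hw1
  have ndw1 : won1.keys.Nodup := by
    rw [hw1]; split
    · exact ndw
    · rw [PySem.Dict.modify]; exact PySem.Dict.nodup_keys_insert won w _ ndw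
  have cw1 : ∀ k, won1.contains k = true ↔ ((k = w ∧ lost.contains w = false) ∨ won.contains k = true) := by
    intro k
    rw [hw1]; split
    · next hc => constructor
                 · exact fun hk => Or.inr hk
                 · rintro (⟨rfl, hf⟩ | hk); · rw [hc] at hf; cases hf
                   · exact hk
    · next hc =>
      have hcf : lost.contains w = false := by simpa using hc
      rw [PySem.Dict.contains_modify]
      simp [hcf]
  -- the A-side final won
  set won2 := if won1.contains z then won1.erase z else won1 with hw2
  have ndw2 : won2.keys.Nodup := by
    rw [hw2]; split
    · exact pv_nodup_keys_erase won1 z ndw1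
    · exact ndw1
  have cw2 : ∀ k, won2.contains k = true ↔ (k ≠ z ∧ won1.contains k = true) := by
    intro k
    rw [hw2]; split
    · exact pv_contains_erase won1 z k
    · next hc =>
      have hcf : won1.contains z = false := by simpa using hc
      constructor
      · intro hk
        refine ⟨?_, hk⟩
        rintro rfl; rw [hcf] at hk; cases hk
      · exact fun hk => hk.2
  -- the A-side final lost
  set lost' := lost.modify z 0 (· + 1) with hl'
  have ndl' : lost'.keys.Nodup := by
    rw [hl', PySem.Dict.modify]; exact PySem.Dict.nodup_keys_insert lost z _ ndl
  have cl : ∀ k, lost'.contains k = true ↔ (k = z ∨ lost.contains k = true) := by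
    intro k
    rw [hl', PySem.Dict.contains_modify]
    simp
  have gl : ∀ k, lost'.getD k 0 = if k = z then lost.getD z 0 + 1 else lost.getD k 0 := by
    intro k
    rw [hl', PySem.Dict.modify, PySem.Dict.getD_insert]
  -- getD is positive only on contained keys; keys outside lost have count 0
  have hpos : ∀ k, 0 < losses.getD k 0 → losses.contains k = true := by
    intro k hk
    by_cases hc : losses.contains k = true
    · exact hc
    · rw [PySem.Dict.getD_of_not_contains losses 0 (by simpa using hc)] at hk; omega
  have hzero : ∀ k, lost.contains k = false → losses.getD k 0 = 0 := by
    intro k hk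
    by_cases hc : losses.contains k = true
    · by_contra hne
      have hlt : 0 < losses.getD k 0 := lt_of_le_of_ne (h7 k) (Ne.symm hne)
      have hct := (h5 k).2 ⟨hc, hlt⟩
      simp [hk] at hct
    · exact PySem.Dict.getD_of_not_contains losses 0 (by simpa using hc)
  have hshow : pvStepA (lost, won) m = (lost', won2) := by
    simp only [pvStepA, hl', hw2, hw1, hw, hz]
  have hshowB : pvStepB losses m = losses' := by
    simp only [pvStepB, hlo', hd1, hw, hz]
  rw [hshow, hshowB]
  refine ⟨ndl', ndw2, nd2, ?_, ?_, ?_, ?_⟩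
  · -- won2 ↔ count 0
    intro k
    rw [cw2 k, cw1 k, c2 k, g2 k]
    by_cases hkz : k = z
    · rw [if_pos hkz]
      have := h7 z
      constructor
      · rintro ⟨hne, -⟩; exact absurd hkz hne
      · rintro ⟨-, habs⟩; omega
    · rw [if_neg hkz]
      by_cases hkw : k = w
      · constructor
        · rintro ⟨-, (⟨-, hlf⟩ | hwk)⟩
          · exact ⟨Or.inr (Or.inl hkw), hzero k (by rw [hkw]; exact hlf)⟩
          · exact ⟨Or.inr (Or.inl hkw), ((h4 k).1 hwk).2⟩
        · rintro ⟨-, hg0⟩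
          refine ⟨hkz, Or.inl ⟨hkw, ?_⟩⟩
          rw [← hkw]
          by_cases hlk : lost.contains k = true
          · have h2 := ((h5 k).1 hlk).2; omega
          · simpa using hlk
      · constructor
        · rintro ⟨-, (⟨he, -⟩ | hwk)⟩
          · exact absurd he hkw
          · obtain ⟨hc, hg⟩ := (h4 k).1 hwk; exact ⟨Or.inr (Or.inr hc), hg⟩
        · rintro ⟨hor, hg0⟩
          rcases hor with he | he | hc
          · exact absurd he hkz
          · exact absurd he hkw
          · exact ⟨hkz, Or.inr ((h4 k).2 ⟨hc, hg0⟩)⟩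
  · -- lost' ↔ positive count
    intro k
    rw [cl k, c2 k, g2 k]
    by_cases hkz : k = z
    · rw [if_pos hkz]
      have := h7 z
      constructor
      · intro _; exact ⟨Or.inl hkz, by omega⟩
      · intro _; exact Or.inl hkz
    · rw [if_neg hkz]
      constructor
      · rintro (he | hlk)
        · exact absurd he hkz
        · obtain ⟨hc, hg⟩ := (h5 k).1 hlk; exact ⟨Or.inr (Or.inr hc), hg⟩
      · rintro ⟨-, hg⟩
        exact Or.inr ((h5 k).2 ⟨hpos k hg, hg⟩)
  · -- values agree on lost'
    intro k hk
    rw [gl k, g2 k]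
    by_cases hkz : k = z
    · rw [if_pos hkz, if_pos hkz]
      by_cases hlz : lost.contains z = true
      · rw [h6 z hlz]
      · have hf : lost.contains z = false := by simpa using hlz
        rw [PySem.Dict.getD_of_not_contains lost 0 hf, hzero z hf]
    · rw [if_neg hkz, if_neg hkz]
      have hlk : lost.contains k = true := by
        rcases (cl k).1 hk with he | hlk
        · exact absurd he hkz
        · exact hlk
      exact h6 k hlk
  · -- nonnegativity
    intro k
    rw [g2 k]
    have := h7 k
    have := h7 z
    split <;> omega

lemma pvInv_fold (nums : List (List Int)) (lost won losses : PySem.Dict Int Int)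
    (h : pvInv lost won losses) :
    pvInv (nums.foldl pvStepA (lost, won)).1 (nums.foldl pvStepA (lost, won)).2
      (nums.foldl pvStepB losses) := by
  induction nums generalizing lost won losses with
  | nil => exact h
  | cons m t ih =>
      have hstep := ih (pvStepA (lost, won) m).1 (pvStepA (lost, won) m).2 (pvStepB losses m)
        (pvInv_step lost won losses m h)
      simpa using hstep

-- ===== VERDICT (by name: the statement is the Claim_ definition above) =====
theorem playersWithZeroOrOneLoss_spec : Claim_equal_playersWithZeroOrOneLoss := by
  intro nums _ _
  unfold Spec_playersWithZeroOrOneLoss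
  unfold playersWithZeroOrOneLoss playersWithZeroOrOneLoss_alt
  have hinv : pvInv (nums.foldl pvStepA (PySem.Dict.empty, PySem.Dict.empty)).1
      (nums.foldl pvStepA (PySem.Dict.empty, PySem.Dict.empty)).2
      (nums.foldl pvStepB PySem.Dict.empty) := by
    apply pvInv_fold
    refine ⟨by simp [PySem.Dict.keys_empty], by simp [PySem.Dict.keys_empty],
      by simp [PySem.Dict.keys_empty], ?_, ?_, ?_, ?_⟩ <;>
      intro k <;> simp [PySem.Dict.contains_empty, PySem.Dict.getD_empty]
  set lost := (nums.foldl pvStepA (PySem.Dict.empty, PySem.Dict.empty)).1 with hl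
  set won := (nums.foldl pvStepA (PySem.Dict.empty, PySem.Dict.empty)).2 with hw
  set losses := nums.foldl pvStepB PySem.Dict.empty with hlo
  obtain ⟨ndl, ndw, ndlo, h4, h5, h6, h7⟩ := hinv
  have hwin : PySem.List.sorted won.keys (fun x => x) =
      PySem.List.sorted ((losses.items.filter (fun kv => kv.2 == 0)).map (fun kv => kv.1))
        (fun x => x) := by
    apply PySem.List.sorted_eq_sorted_of_perm _ _ _ (fun a b h => h)
    apply (List.perm_ext_iff_of_nodup ndw (pv_nodup_filter_map losses ndlo (fun v => v == 0))).2
    intro k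
    rw [← PySem.Dict.contains_iff_mem_keys, pv_mem_filter_map losses ndlo (fun v => v == 0) k, h4 k]
    simp
  have hlos : PySem.List.sorted
        ((lost.items.filter (fun kv => decide (kv.2 ≤ 1))).map (fun kv => kv.1)) (fun x => x) =
      PySem.List.sorted ((losses.items.filter (fun kv => kv.2 == 1)).map (fun kv => kv.1))
        (fun x => x) := by
    apply PySem.List.sorted_eq_sorted_of_perm _ _ _ (fun a b h => h)
    apply (List.perm_ext_iff_of_nodup (pv_nodup_filter_map lost ndl (fun v => decide (v ≤ 1)))
      (pv_nodup_filter_map losses ndlo (fun v => v == 1))).2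
    intro k
    rw [pv_mem_filter_map lost ndl (fun v => decide (v ≤ 1)) k,
      pv_mem_filter_map losses ndlo (fun v => v == 1) k]
    simp only [decide_eq_true_eq, beq_iff_eq]
    constructor
    · rintro ⟨hlk, hle⟩
      obtain ⟨hc, hpos⟩ := (h5 k).1 hlk
      have heq := h6 k hlk
      exact ⟨hc, by omega⟩
    · rintro ⟨hc, h1⟩
      have hlk : lost.contains k = true := (h5 k).2 ⟨hc, by omega⟩
      refine ⟨hlk, ?_⟩
      rw [h6 k hlk]; omega
  show [PySem.List.sorted won.keys (fun x => x),
      PySem.List.sorted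
        (lost.items.foldl (fun acc kv => if kv.2 ≤ 1 then acc ++ [kv.1] else acc) [])
        (fun x => x)] =
    [PySem.List.sorted ((losses.items.filter (fun kv => kv.2 == 0)).map (fun kv => kv.1))
        (fun x => x),
      PySem.List.sorted ((losses.items.filter (fun kv => kv.2 == 1)).map (fun kv => kv.1))
        (fun x => x)]
  rw [pv_foldl_app, List.nil_append, hwin, hlos]
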